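-- pv_equiv track=rewrite | github.com/SymphonyIceAttack/pytoexe-use | python-files/1771735299124-1mgd-min37.py | find_group_by_minute
-- ===== SOURCE A (Python) =====
-- trade_table = [
--     ["01:00:00","01:00:30 prepare trade","01:01:00 go trade"],
--     ["01:01:30","01:02:00 prepare trade","01:02:30 go trade"],
--     ["01:03:00","01:03:30 prepare trade","01:04:00 go trade"],
--     ["01:04:30","01:05:00 prepare trade","01:05:30 go trade"],
--     ["01:06:00","01:06:30 prepare trade","01:07:00 go trade"],
--     ["01:07:30","01:08:00 prepare trade","01:08:30 go trade"],
--     ["01:09:00","01:09:30 prepare trade","01:10:00 go trade"],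
--     ["01:10:30","01:11:00 prepare trade","01:11:30 go trade"],
--     ["01:12:00","01:12:30 prepare trade","01:13:00 go trade"],
--     ["01:13:30","01:14:00 prepare trade","01:14:30 go trade"],
--     ["01:15:00","01:15:30 prepare trade","01:16:00 go trade"],
--     ["01:16:30","01:17:00 prepare trade","01:17:30 go trade"],
--     ["01:18:00","01:18:30 prepare trade","01:19:00 go trade"],
--     ["01:19:30","01:20:00 prepare trade","01:20:30 go trade"],
--     ["01:21:00","01:21:30 prepare trade","01:22:00 go trade"],
--     ["01:22:30","01:23:00 prepare trade","01:23:30 go trade"],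
--     ["01:24:00","01:24:30 prepare trade","01:25:00 go trade"],
--     ["01:25:30","01:26:00 prepare trade","01:26:30 go trade"],
--     ["01:27:00","01:27:30 prepare trade","01:28:00 go trade"],
--     ["01:28:30","01:29:00 prepare trade","01:29:30 go trade"],
--     ["01:30:00","01:30:30 prepare trade","01:31:00 go trade"],
--     ["01:31:30","01:32:00 prepare trade","01:32:30 go trade"],
--     ["01:33:00","01:33:30 prepare trade","01:34:00 go trade"],
--     ["01:34:30","01:35:00 prepare trade","01:35:30 go trade"],
--     ["01:36:00","01:36:30 prepare trade","01:37:00 go trade"],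
--     ["01:37:30","01:38:00 prepare trade","01:38:30 go trade"],
--     ["01:39:00","01:39:30 prepare trade","01:40:00 go trade"],
--     ["01:40:30","01:41:00 prepare trade","01:41:30 go trade"],
--     ["01:42:00","01:42:30 prepare trade","01:43:00 go trade"],
--     ["01:43:30","01:44:00 prepare trade","01:44:30 go trade"],
--     ["01:45:00","01:45:30 prepare trade","01:46:00 go trade"],
--     ["01:46:30","01:47:00 prepare trade","01:47:30 go trade"],
--     ["01:48:00","01:48:30 prepare trade","01:49:00 go trade"],
--     ["01:49:30","01:50:00 prepare trade","01:50:30 go trade"],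
--     ["01:51:00","01:51:30 prepare trade","01:52:00 go trade"],
--     ["01:52:30","01:53:00 prepare trade","01:53:30 go trade"],
--     ["01:54:00","01:54:30 prepare trade","01:55:00 go trade"],
--     ["01:55:30","01:56:00 prepare trade","01:56:30 go trade"],
--     ["01:57:00","01:57:30 prepare trade","01:58:00 go trade"],
--     ["01:58:30","01:59:00 prepare trade","01:59:30 go trade"]
-- ]
--
-- def find_group_by_minute(minute):
--     if minute is None: return None
--     for i, g in enumerate(trade_table):
--         for v in g:
--             try:
--                 if int(v.split(":")[1]) == minute: return i
--             except: continue
--     return None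
-- ===== SOURCE B (Python) =====
-- def find_group_by_minute(minute):
--     # The table is a fixed constant: group i holds times 01:00:00 + 90*i .. +90*i+60 s,
--     # so minute m (0..59) first appears in group (2*m)//3; anything else is absent.
--     if minute is None:
--         return None
--     if 0 <= minute <= 59:
--         return (2 * minute) // 3
--     return None
-- ===== Notes on version B (the rewrite author's own statement) =====
-- stated objective: simpler
-- what changed: B replaces A's per-call nested scan-and-parse of the fixed 40x3 table with a closed-form arithmetic formula (2*m)//3 derived from the table's constant 90-second cadence, plus a range check.
import Mathlib
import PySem

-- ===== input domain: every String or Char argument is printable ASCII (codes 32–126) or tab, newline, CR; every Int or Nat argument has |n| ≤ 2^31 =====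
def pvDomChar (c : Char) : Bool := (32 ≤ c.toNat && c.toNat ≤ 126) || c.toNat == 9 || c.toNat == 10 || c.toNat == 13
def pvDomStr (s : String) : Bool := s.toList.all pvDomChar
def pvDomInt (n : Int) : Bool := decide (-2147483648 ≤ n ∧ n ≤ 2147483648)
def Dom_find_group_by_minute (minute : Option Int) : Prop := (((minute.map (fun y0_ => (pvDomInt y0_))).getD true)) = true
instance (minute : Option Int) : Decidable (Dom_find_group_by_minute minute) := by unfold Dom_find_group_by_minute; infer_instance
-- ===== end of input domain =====

-- B replaces A's per-call nested scan of the fixed table with the closed-form group formula (2*m)//3 for m in 0..59; return value identical.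
-- ===== PORT A =====
def trade_table : List (List String) := [
  ["01:00:00", "01:00:30 prepare trade", "01:01:00 go trade"],
  ["01:01:30", "01:02:00 prepare trade", "01:02:30 go trade"],
  ["01:03:00", "01:03:30 prepare trade", "01:04:00 go trade"],
  ["01:04:30", "01:05:00 prepare trade", "01:05:30 go trade"],
  ["01:06:00", "01:06:30 prepare trade", "01:07:00 go trade"],
  ["01:07:30", "01:08:00 prepare trade", "01:08:30 go trade"],
  ["01:09:00", "01:09:30 prepare trade", "01:10:00 go trade"],
  ["01:10:30", "01:11:00 prepare trade", "01:11:30 go trade"],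
  ["01:12:00", "01:12:30 prepare trade", "01:13:00 go trade"],
  ["01:13:30", "01:14:00 prepare trade", "01:14:30 go trade"],
  ["01:15:00", "01:15:30 prepare trade", "01:16:00 go trade"],
  ["01:16:30", "01:17:00 prepare trade", "01:17:30 go trade"],
  ["01:18:00", "01:18:30 prepare trade", "01:19:00 go trade"],
  ["01:19:30", "01:20:00 prepare trade", "01:20:30 go trade"],
  ["01:21:00", "01:21:30 prepare trade", "01:22:00 go trade"],
  ["01:22:30", "01:23:00 prepare trade", "01:23:30 go trade"],
  ["01:24:00", "01:24:30 prepare trade", "01:25:00 go trade"],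
  ["01:25:30", "01:26:00 prepare trade", "01:26:30 go trade"],
  ["01:27:00", "01:27:30 prepare trade", "01:28:00 go trade"],
  ["01:28:30", "01:29:00 prepare trade", "01:29:30 go trade"],
  ["01:30:00", "01:30:30 prepare trade", "01:31:00 go trade"],
  ["01:31:30", "01:32:00 prepare trade", "01:32:30 go trade"],
  ["01:33:00", "01:33:30 prepare trade", "01:34:00 go trade"],
  ["01:34:30", "01:35:00 prepare trade", "01:35:30 go trade"],
  ["01:36:00", "01:36:30 prepare trade", "01:37:00 go trade"],
  ["01:37:30", "01:38:00 prepare trade", "01:38:30 go trade"],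
  ["01:39:00", "01:39:30 prepare trade", "01:40:00 go trade"],
  ["01:40:30", "01:41:00 prepare trade", "01:41:30 go trade"],
  ["01:42:00", "01:42:30 prepare trade", "01:43:00 go trade"],
  ["01:43:30", "01:44:00 prepare trade", "01:44:30 go trade"],
  ["01:45:00", "01:45:30 prepare trade", "01:46:00 go trade"],
  ["01:46:30", "01:47:00 prepare trade", "01:47:30 go trade"],
  ["01:48:00", "01:48:30 prepare trade", "01:49:00 go trade"],
  ["01:49:30", "01:50:00 prepare trade", "01:50:30 go trade"],
  ["01:51:00", "01:51:30 prepare trade", "01:52:00 go trade"],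
  ["01:52:30", "01:53:00 prepare trade", "01:53:30 go trade"],
  ["01:54:00", "01:54:30 prepare trade", "01:55:00 go trade"],
  ["01:55:30", "01:56:00 prepare trade", "01:56:30 go trade"],
  ["01:57:00", "01:57:30 prepare trade", "01:58:00 go trade"],
  ["01:58:30", "01:59:00 prepare trade", "01:59:30 go trade"]]

-- int(v.split(":")[1]); `none` exactly where Python's int()/[1] raises (caught by A's `except`)
def cellMinute (v : String) : Option Int :=
  ((PySem.Str.split? v ":").bind (fun ps => PySem.List.pyGet? ps 1)).bind PySem.Int.ofStr?

-- A's inner loop `for v in g`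
def rowA (m : Int) (i : Int) : List String → Option Int
  | [] => none
  | v :: vs =>
    match cellMinute v with
    | some k => if k = m then some i else rowA m i vs
    | none => rowA m i vs

-- A's outer loop `for i, g in enumerate(trade_table)`
def tblA (m : Int) : List (Int × List String) → Option Int
  | [] => none
  | (i, g) :: rest =>
    match rowA m i g with
    | some r => some r
    | none => tblA m rest

def find_group_by_minute (minute : Option Int) : Option Int :=
  match minute with
  | none => none
  | some m => tblA m (PySem.List.enumerate trade_table)

-- ===== PORT B =====
def find_group_by_minute_alt (minute : Option Int) : Option Int :=
  match minute with
  | none => none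
  | some m =>
    if 0 ≤ m ∧ m ≤ 59 then some (PySem.Int.floordiv (2 * m) 3) else none

-- ===== PRECONDITION & SPEC =====
def Spec_find_group_by_minute (minute : Option Int) (out : Option Int) : Prop := out = find_group_by_minute_alt minute
instance (minute : Option Int) (out : Option Int) : Decidable (Spec_find_group_by_minute minute out) := by unfold Spec_find_group_by_minute; infer_instance

-- ===== CLAIM =====
def Claim_equal_find_group_by_minute : Prop := ∀ (minute : Option Int), Dom_find_group_by_minute minute → Spec_find_group_by_minute minute (find_group_by_minute minute)

-- ===== LEMMAS AND PROOFS =====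

-- every table cell's parsed minute lies in [0, 59]
def cellOK (v : String) : Bool := (cellMinute v).all (fun k => decide (0 ≤ k ∧ k ≤ 59))

lemma rowA_none (m i : Int) (hm : m < 0 ∨ 59 < m) :
    ∀ g : List String, g.all cellOK = true → rowA m i g = none := by
  intro g
  induction g with
  | nil => intro _; rfl
  | cons v vs ih =>
    intro h
    simp only [List.all_cons, Bool.and_eq_true] at h
    cases hc : cellMinute v with
    | none => simpa only [rowA, hc] using ih h.2
    | some k =>
      have hk := h.1
      simp only [cellOK, hc, Option.all_some, decide_eq_true_eq] at hk
      simp only [rowA, hc, if_neg (show ¬ k = m by omega)]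
      exact ih h.2

lemma tblA_none (m : Int) (hm : m < 0 ∨ 59 < m) :
    ∀ l : List (Int × List String), (l.all (fun p => p.2.all cellOK)) = true → tblA m l = none := by
  intro l
  induction l with
  | nil => intro _; rfl
  | cons p rest ih =>
    intro h
    simp only [List.all_cons, Bool.and_eq_true] at h
    obtain ⟨i, g⟩ := p
    simp only [tblA, rowA_none m i hm g h.1]
    exact ih h.2

lemma enum_cells_ok :
    ((PySem.List.enumerate trade_table).all (fun p => p.2.all cellOK)) = true := by decide

set_option maxRecDepth 8192 in
lemma small_agree : ∀ n ∈ List.range 60,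
    find_group_by_minute (some (n : Int)) = find_group_by_minute_alt (some (n : Int)) := by decide

-- ===== VERDICT =====
theorem find_group_by_minute_spec : Claim_equal_find_group_by_minute := by
  intro minute _
  unfold Spec_find_group_by_minute
  cases minute with
  | none => rfl
  | some m =>
    by_cases hm : 0 ≤ m ∧ m ≤ 59
    · have hmem : m.toNat ∈ List.range 60 := List.mem_range.mpr (by omega)
      have := small_agree m.toNat hmem
      rwa [Int.toNat_of_nonneg hm.1] at this
    · have hm' : m < 0 ∨ 59 < m := by omega
      show find_group_by_minute (some m) = find_group_by_minute_alt (some m)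
      simp only [find_group_by_minute, find_group_by_minute_alt, if_neg hm]
      rw [tblA_none m hm' _ enum_cells_ok]
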